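-- pv_equiv track=rewrite | github.com/champashan/task | script2.py | generate_versions
-- ===== SOURCE A (Python) =====
-- import itertools
--
-- def generate_versions(template):
--     parts = template.split(".")
--     versions = []
--     for indices in itertools.product(range(1, 10), repeat=parts.count("*")):
--         version = []
--         idx = 0
--         for part in parts:
--             if part == "*":
--                 version.append(str(indices[idx]))
--                 idx += 1
--             else:
--                 version.append(part)
--         versions.append(".".join(version))
--     return versions
-- ===== SOURCE B (Python) =====
-- def generate_versions(template):
--     results = [[]]
--     for part in template.split("."):
--         if part == "*":
--             results = [p + [str(d)] for p in results for d in range(1, 10)]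
--         else:
--             results = [p + [part] for p in results]
--     return [".".join(p) for p in results]
-- ===== Notes on version B (the rewrite author's own statement) =====
-- stated objective: simpler
-- what changed: Replaces itertools.product over index tuples plus per-tuple idx bookkeeping with a single left-to-right fold that grows a list of partial versions (appending the fixed part, or all nine digits for a '*').
import Mathlib
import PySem

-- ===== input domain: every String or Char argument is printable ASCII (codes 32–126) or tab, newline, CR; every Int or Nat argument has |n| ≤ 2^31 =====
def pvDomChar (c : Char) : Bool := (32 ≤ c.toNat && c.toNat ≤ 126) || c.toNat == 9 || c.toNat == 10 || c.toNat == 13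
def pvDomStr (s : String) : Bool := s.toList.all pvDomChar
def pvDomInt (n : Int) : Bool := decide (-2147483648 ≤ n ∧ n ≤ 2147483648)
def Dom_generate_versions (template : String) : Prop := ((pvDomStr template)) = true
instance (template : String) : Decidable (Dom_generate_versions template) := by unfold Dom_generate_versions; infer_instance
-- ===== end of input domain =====

-- B replaces the itertools.product/index-tuple enumeration with a single fold growing partial versions (simpler decomposition, same cost).

-- ===== PORT A =====
-- itertools.product(range(1, 10), repeat=k): leftmost coordinate varies slowest
def pvProdRep : Nat → List (List Int)
  | 0 => [[]]
  | k + 1 => (PySem.List.pyRange 1 10 1).flatMap (fun d => (pvProdRep k).map (d :: ·))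

def generate_versions (template : String) : List String :=
  -- split? is always `some` here since "." ≠ ""
  let parts := (PySem.Str.split? template ".").getD []
  (pvProdRep (parts.count "*")).foldl
    (fun versions indices =>
      -- inner loop over parts carrying (version, idx); indices[idx] is always in range,
      -- so the total pyGetD (default 0) is exact here
      let st := parts.foldl
        (fun (st : List String × Int) part =>
          if part = "*" then
            (st.1 ++ [PySem.Int.toStr (PySem.List.pyGetD indices st.2 0)], st.2 + 1)
          else
            (st.1 ++ [part], st.2))
        ([], 0)
      versions ++ [PySem.Str.join "." st.1])
    []

-- ===== PORT B =====
def generate_versions_alt (template : String) : List String :=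
  let results := ((PySem.Str.split? template ".").getD []).foldl
    (fun results part =>
      if part = "*" then
        results.flatMap (fun p => (PySem.List.pyRange 1 10 1).map (fun d => p ++ [PySem.Int.toStr d]))
      else
        results.map (fun p => p ++ [part]))
    [[]]
  results.map (fun p => PySem.Str.join "." p)

-- ===== PRECONDITION & SPEC =====
def Spec_generate_versions (template : String) (out : List String) : Prop := out = generate_versions_alt template
instance (template : String) (out : List String) : Decidable (Spec_generate_versions template out) := by unfold Spec_generate_versions; infer_instance

-- ===== CLAIM (what is proved, stated in full; the proofs are below) =====
def Claim_equal_generate_versions : Prop := ∀ (template : String), Dom_generate_versions template → Spec_generate_versions template (generate_versions template)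

-- ===== LEMMAS AND PROOFS =====

-- substitute the entries of `rest` for the '*'s of `parts`, in order
def pvFill : List String → List Int → List String
  | [], _ => []
  | p :: ps, rest =>
    if p = "*" then PySem.Int.toStr rest.headI :: pvFill ps rest.tail
    else p :: pvFill ps rest

def pvStepB (results : List (List String)) (part : String) : List (List String) :=
  if part = "*" then
    results.flatMap (fun p => (PySem.List.pyRange 1 10 1).map (fun d => p ++ [PySem.Int.toStr d]))
  else
    results.map (fun p => p ++ [part])

lemma pvProdRep_length {k : Nat} {t : List Int} (h : t ∈ pvProdRep k) : t.length = k := by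
  induction k generalizing t with
  | zero => simp [pvProdRep] at h; simp [h]
  | succ k ih =>
    simp [pvProdRep, List.mem_flatMap, List.mem_map] at h
    obtain ⟨d, _, t', ht', rfl⟩ := h
    simp [ih ht']

lemma pv_innerA (parts : List String) (v : List String) (pre rest : List Int)
    (hcount : parts.count "*" ≤ rest.length) :
    parts.foldl
      (fun (st : List String × Int) part =>
        if part = "*" then
          (st.1 ++ [PySem.Int.toStr (PySem.List.pyGetD (pre ++ rest) st.2 0)], st.2 + 1)
        else
          (st.1 ++ [part], st.2))
      (v, (pre.length : Int))
    = (v ++ pvFill parts rest, (pre.length : Int) + parts.count "*") := by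
  induction parts generalizing v pre rest with
  | nil => simp [pvFill]
  | cons p ps ih =>
    by_cases hp : p = "*"
    · subst hp
      have hcnt : ps.count "*" + 1 ≤ rest.length := by
        simpa [List.count_cons] using hcount
      obtain ⟨r, rs, rfl⟩ : ∃ r rs, rest = r :: rs := by
        cases rest with
        | nil => simp at hcnt
        | cons a b => exact ⟨a, b, rfl⟩
      have hget : PySem.List.pyGetD (pre ++ r :: rs) (pre.length : Int) 0 = r := by
        rw [PySem.List.pyGetD_natCast]
        simp [List.getD]
      simp only [List.foldl_cons, reduceIte, hget]
      rw [List.append_cons pre r rs,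
          show (pre.length : Int) + 1 = ((pre ++ [r]).length : Int) by simp]
      rw [ih (v ++ [PySem.Int.toStr r]) (pre ++ [r]) rs (by simpa using hcnt)]
      simp [pvFill]
      omega
    · simp only [List.foldl_cons, if_neg hp]
      rw [ih (v ++ [p]) pre rest (by simpa [List.count_cons, hp] using hcount)]
      simp [pvFill, hp]

lemma pv_A_eq_map (parts : List String) :
    (pvProdRep (parts.count "*")).foldl
      (fun versions indices =>
        versions ++ [PySem.Str.join "." (parts.foldl
          (fun (st : List String × Int) part =>
            if part = "*" then
              (st.1 ++ [PySem.Int.toStr (PySem.List.pyGetD indices st.2 0)], st.2 + 1)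
            else
              (st.1 ++ [part], st.2))
          ([], 0)).1])
      []
    = (pvProdRep (parts.count "*")).map (fun t => PySem.Str.join "." (pvFill parts t)) := by
  rw [PySem.List.foldl_append_singleton_eq_map
    (fun indices => PySem.Str.join "." (parts.foldl
      (fun (st : List String × Int) part =>
        if part = "*" then
          (st.1 ++ [PySem.Int.toStr (PySem.List.pyGetD indices st.2 0)], st.2 + 1)
        else
          (st.1 ++ [part], st.2))
      ([], 0)).1)]
  rw [List.nil_append]
  refine List.map_congr_left (fun t ht => ?_)
  have hlen := pvProdRep_length ht
  have h := pv_innerA parts [] [] t (by simp [hlen])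
  simp only [List.nil_append, List.length_nil, Nat.cast_zero] at h
  rw [h]

lemma pv_foldB_flat (parts : List String) (acc : List (List String)) :
    parts.foldl pvStepB acc
    = acc.flatMap (fun v => (parts.foldl pvStepB [[]]).map (v ++ ·)) := by
  induction parts generalizing acc with
  | nil => simp
  | cons p ps ih =>
    by_cases hp : p = "*"
    · subst hp
      rw [List.foldl_cons, ih (pvStepB acc "*"),
          List.foldl_cons, ih (pvStepB [[]] "*")]
      simp [pvStepB, List.flatMap_assoc, List.flatMap_map, List.map_flatMap,
            List.map_map, Function.comp_def, List.append_assoc]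
    · rw [List.foldl_cons, ih (pvStepB acc p),
          List.foldl_cons, ih (pvStepB [[]] p)]
      simp [pvStepB, hp, List.flatMap_map, List.map_flatMap, List.map_map,
            Function.comp_def, List.append_assoc]

lemma pv_E_eq (parts : List String) :
    parts.foldl pvStepB [[]] = (pvProdRep (parts.count "*")).map (pvFill parts) := by
  induction parts with
  | nil => simp [pvProdRep, pvFill]
  | cons p ps ih =>
    rw [List.foldl_cons, pv_foldB_flat ps (pvStepB [[]] p)]
    by_cases hp : p = "*"
    · subst hp
      simp [pvStepB, pvProdRep, ih, List.flatMap_map,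
            List.map_flatMap, List.map_map, Function.comp_def, pvFill]
    · simp [pvStepB, hp, ih, List.map_map, Function.comp_def, pvFill]

-- ===== VERDICT (by name: the statement is the Claim_ definition above) =====
theorem generate_versions_spec : Claim_equal_generate_versions := by
  intro template _
  show generate_versions template = generate_versions_alt template
  rw [show generate_versions template
      = (pvProdRep ((((PySem.Str.split? template ".").getD []).count "*"))).foldl
          (fun versions indices =>
            versions ++ [PySem.Str.join "." ((((PySem.Str.split? template ".").getD []).foldl
              (fun (st : List String × Int) part =>
                if part = "*" then
                  (st.1 ++ [PySem.Int.toStr (PySem.List.pyGetD indices st.2 0)], st.2 + 1)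
                else
                  (st.1 ++ [part], st.2))
              ([], 0)).1)])
          [] from rfl,
      show generate_versions_alt template
      = ((((PySem.Str.split? template ".").getD []).foldl pvStepB [[]]).map
          (fun p => PySem.Str.join "." p)) from rfl]
  rw [pv_A_eq_map, pv_E_eq, List.map_map]
  simp [Function.comp_def]
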